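-- pv_equiv track=rewrite | github.com/hemmer2079/daily_stock_analysis | src/agent/skills/defaults.py | get_primary_default_skill_id
-- ===== SOURCE A (Python) =====
-- from typing import Dict, Iterable, List, Optional
--
-- DEFAULT_ACTIVE_SKILL_IDS: tuple[str, ...] = (
--     "bull_trend",
--     "ma_golden_cross",
--     "volume_breakout",
--     "shrink_pullback",
-- )
--
-- PRIMARY_DEFAULT_SKILL_ID = DEFAULT_ACTIVE_SKILL_IDS[0]
--
-- def get_primary_default_skill_id(available_skill_ids: Optional[Iterable[str]] = None) -> str:
--     if available_skill_ids is None: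
--         return PRIMARY_DEFAULT_SKILL_ID
--
--     available = [skill_id for skill_id in available_skill_ids if isinstance(skill_id, str) and skill_id]
--     if not available:
--         return ""
--
--     for skill_id in DEFAULT_ACTIVE_SKILL_IDS:
--         if skill_id in available:
--             return skill_id
--     return available[0]
-- ===== SOURCE B (Python) =====
-- from typing import Dict, Iterable, List, Optional
--
-- DEFAULT_ACTIVE_SKILL_IDS: tuple[str, ...] = (
--     "bull_trend",
--     "ma_golden_cross",
--     "volume_breakout",
--     "shrink_pullback",
-- )
--
-- PRIMARY_DEFAULT_SKILL_ID = DEFAULT_ACTIVE_SKILL_IDS[0]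
--
-- _PRIORITY = {sid: i for i, sid in enumerate(DEFAULT_ACTIVE_SKILL_IDS)}
-- _FALLBACK = len(DEFAULT_ACTIVE_SKILL_IDS)
--
--
-- def get_primary_default_skill_id(available_skill_ids: Optional[Iterable[str]] = None) -> str:
--     if available_skill_ids is None:
--         return PRIMARY_DEFAULT_SKILL_ID
--
--     # single pass: remember the first usable id and the best (smallest)
--     # default-priority seen so far; no intermediate list, no inner scans
--     first = None
--     best = _FALLBACK
--     for skill_id in available_skill_ids:
--         if not (isinstance(skill_id, str) and skill_id):
--             continue
--         if first is None:
--             first = skill_id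
--         idx = _PRIORITY.get(skill_id)
--         if idx is not None and idx < best:
--             best = idx
--
--     if first is None:
--         return ""
--     return DEFAULT_ACTIVE_SKILL_IDS[best] if best < _FALLBACK else first
-- ===== Notes on version B (the rewrite author's own statement) =====
-- stated objective: alternative
-- what changed: Replaces A's two-stage filter-into-a-list plus a loop over the defaults with an 'in available' scan per default by one streaming fold over the input that tracks the first usable id and the smallest default-priority index (via a precomputed priority dict), so no intermediate list is built and no inner scan occurs.
import Mathlib
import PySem

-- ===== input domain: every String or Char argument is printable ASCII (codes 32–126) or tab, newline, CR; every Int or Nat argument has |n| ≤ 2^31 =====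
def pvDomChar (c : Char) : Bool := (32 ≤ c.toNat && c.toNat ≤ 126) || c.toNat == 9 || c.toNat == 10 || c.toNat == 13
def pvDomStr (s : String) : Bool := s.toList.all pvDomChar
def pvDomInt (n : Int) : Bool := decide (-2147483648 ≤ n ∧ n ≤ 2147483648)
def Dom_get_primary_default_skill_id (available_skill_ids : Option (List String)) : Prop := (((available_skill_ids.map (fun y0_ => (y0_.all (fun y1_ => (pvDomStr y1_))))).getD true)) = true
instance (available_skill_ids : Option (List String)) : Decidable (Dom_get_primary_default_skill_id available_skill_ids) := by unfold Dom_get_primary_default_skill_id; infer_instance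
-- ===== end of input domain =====

-- B replaces A's filter-into-a-list + per-default membership scans by a single streaming
-- fold over the input that tracks the first usable id and the smallest default-priority index.


-- ===== PORT A =====
def DEFAULT_ACTIVE_SKILL_IDS : List String :=
  ["bull_trend", "ma_golden_cross", "volume_breakout", "shrink_pullback"]

def PRIMARY_DEFAULT_SKILL_ID : String := DEFAULT_ACTIVE_SKILL_IDS.headD ""

def get_primary_default_skill_id (available_skill_ids : Option (List String)) : String :=
  match available_skill_ids with
  | none => PRIMARY_DEFAULT_SKILL_ID
  | some xs =>
    -- isinstance(skill_id, str) is always true under the type convention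
    let available := xs.filter (fun skill_id => skill_id ≠ "")
    if available.isEmpty then ""
    else
      -- for skill_id in DEFAULT_ACTIVE_SKILL_IDS: if skill_id in available: return skill_id
      match DEFAULT_ACTIVE_SKILL_IDS.find? (fun skill_id => available.contains skill_id) with
      | some skill_id => skill_id
      | none => available.headD ""   -- available[0]; available is nonempty here

-- ===== PORT B =====
def pvDefaultsB : List String :=
  ["bull_trend", "ma_golden_cross", "volume_breakout", "shrink_pullback"]

-- _PRIORITY = {sid: i for i, sid in enumerate(DEFAULT_ACTIVE_SKILL_IDS)}
def pvPriority : PySem.Dict String Int :=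
  (PySem.List.enumerate pvDefaultsB).foldl
    (fun d p => d.insert p.2 p.1) PySem.Dict.empty

-- _FALLBACK = len(DEFAULT_ACTIVE_SKILL_IDS)
def pvFallback : Int := Int.ofNat pvDefaultsB.length

-- one loop step of B: update (first, best) with one skill_id
def pvStepB (p : Option String × Int) (skill_id : String) : Option String × Int :=
  if skill_id = "" then p   -- 'continue' on the unusable ids
  else
    let first := match p.1 with | none => some skill_id | some f => some f
    let best := match pvPriority.get? skill_id with
      | some idx => if idx < p.2 then idx else p.2
      | none => p.2
    (first, best)

def get_primary_default_skill_id_alt (available_skill_ids : Option (List String)) : String :=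
  match available_skill_ids with
  | none => pvDefaultsB.headD ""   -- PRIMARY_DEFAULT_SKILL_ID = DEFAULT_ACTIVE_SKILL_IDS[0]
  | some xs =>
    let st := xs.foldl pvStepB (none, pvFallback)
    match st.1 with
    | none => ""
    | some first =>
      -- DEFAULT_ACTIVE_SKILL_IDS[best] is guarded by best < _FALLBACK, so getD is never taken
      if st.2 < pvFallback then (PySem.List.pyGet? pvDefaultsB st.2).getD "" else first

-- ===== PRECONDITION & SPEC =====
def Spec_get_primary_default_skill_id (available_skill_ids : Option (List String)) (out : String) : Prop := out = get_primary_default_skill_id_alt available_skill_ids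
instance (available_skill_ids : Option (List String)) (out : String) : Decidable (Spec_get_primary_default_skill_id available_skill_ids out) := by unfold Spec_get_primary_default_skill_id; infer_instance

-- ===== CLAIM (what is proved, stated in full; the proofs are below) =====
def Claim_equal_get_primary_default_skill_id : Prop := ∀ (available_skill_ids : Option (List String)), Dom_get_primary_default_skill_id available_skill_ids → Spec_get_primary_default_skill_id available_skill_ids (get_primary_default_skill_id available_skill_ids)

-- ===== LEMMAS AND PROOFS =====

-- the priority (4 = not a default), written out
def pvKey (s : String) : Int :=
  if s = "bull_trend" then 0
  else if s = "ma_golden_cross" then 1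
  else if s = "volume_breakout" then 2
  else if s = "shrink_pullback" then 3
  else 4

lemma pvGet_eq (s : String) :
    pvPriority.get? s = if pvKey s < 4 then some (pvKey s) else none := by
  have h : pvPriority = PySem.Dict.mk [("bull_trend", (0:Int)), ("ma_golden_cross", 1),
      ("volume_breakout", 2), ("shrink_pullback", 3)] := by rfl
  simp only [h, PySem.Dict.get?_mk_cons, beq_iff_eq, pvKey]
  by_cases h0 : s = "bull_trend"
  · subst h0; rfl
  by_cases h1 : s = "ma_golden_cross"
  · subst h1; rfl
  by_cases h2 : s = "volume_breakout"
  · subst h2; rfl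
  by_cases h3 : s = "shrink_pullback"
  · subst h3; rfl
  rw [if_neg (mt Eq.symm h0), if_neg (mt Eq.symm h1), if_neg (mt Eq.symm h2),
      if_neg (mt Eq.symm h3), if_neg h0, if_neg h1, if_neg h2, if_neg h3]
  norm_num
  rfl

lemma pvKey_nonneg (s : String) : 0 ≤ pvKey s := by
  simp only [pvKey]; split_ifs <;> omega

lemma pvKey_le_four (s : String) : pvKey s ≤ 4 := by
  simp only [pvKey]; split_ifs <;> omega

-- the two independent components of B's loop state
def pvFirstF (f : Option String) (s : String) : Option String :=
  match f with | none => some s | some g => some g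

def pvBestStep (b : Int) (s : String) : Int :=
  match pvPriority.get? s with
  | some idx => if idx < b then idx else b
  | none => b

lemma pvBestStep_eq (b : Int) (s : String) (hb : b ≤ 4) :
    pvBestStep b s = min b (pvKey s) := by
  simp only [pvBestStep, pvGet_eq]
  by_cases h4 : pvKey s < 4
  · simp only [if_pos h4]
    split_ifs with hlt <;> omega
  · simp only [if_neg h4]
    have := pvKey_le_four s
    omega

-- skipping the "" guard: the fold over the raw input is the fold over the filtered list
lemma pvFold_filter (xs : List String) (init : Option String × Int) :
    xs.foldl pvStepB init = (xs.filter (fun s => s ≠ "")).foldl pvStepB init := by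
  induction xs generalizing init with
  | nil => rfl
  | cons x t ih =>
    by_cases hx : x = ""
    · simp [hx, List.foldl_cons, pvStepB, ih]
    · simp [hx, List.foldl_cons, ih]

-- over a ""-free list, the pair fold splits into its two components
lemma pvFold_split (l : List String) (hl : ∀ s ∈ l, s ≠ "") (f : Option String) (b : Int) :
    l.foldl pvStepB (f, b) = (l.foldl pvFirstF f, l.foldl pvBestStep b) := by
  induction l generalizing f b with
  | nil => rfl
  | cons x t ih =>
    have hx : x ≠ "" := hl x List.mem_cons_self
    have hstep : pvStepB (f, b) x = (pvFirstF f x, pvBestStep b x) := by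
      simp [pvStepB, if_neg hx, pvFirstF, pvBestStep]
    simp only [List.foldl_cons, hstep]
    exact ih (fun s hs => hl s (List.mem_cons_of_mem x hs)) _ _

-- first component: once set it sticks, so from none it is head?
lemma pvFirst_some (l : List String) (g : String) :
    l.foldl pvFirstF (some g) = some g := by
  induction l with
  | nil => rfl
  | cons x t ih => simpa [pvFirstF] using ih

lemma pvFirst_none (l : List String) : l.foldl pvFirstF none = l.head? := by
  cases l with
  | nil => rfl
  | cons x t => simp [List.foldl_cons, pvFirstF, pvFirst_some]

-- best component: a running min of pvKey
lemma pvBest_le_init (l : List String) (b : Int) (hb : b ≤ 4) :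
    l.foldl pvBestStep b ≤ b ∧ l.foldl pvBestStep b ≤ 4 := by
  induction l generalizing b with
  | nil => exact ⟨le_refl b, hb⟩
  | cons x t ih =>
    rw [List.foldl_cons, pvBestStep_eq b x hb]
    have h1 : min b (pvKey x) ≤ 4 := by omega
    have := ih (min b (pvKey x)) h1
    exact ⟨le_trans this.1 (by omega), this.2⟩

lemma pvBest_le_mem (l : List String) (b : Int) (hb : b ≤ 4) (y : String) (hy : y ∈ l) :
    l.foldl pvBestStep b ≤ pvKey y := by
  induction l generalizing b with
  | nil => cases hy
  | cons x t ih =>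
    rw [List.foldl_cons, pvBestStep_eq b x hb]
    have h4 : min b (pvKey x) ≤ 4 := by omega
    rcases List.mem_cons.mp hy with h | h
    · subst h
      exact le_trans (pvBest_le_init t _ h4).1 (by omega)
    · exact ih (min b (pvKey x)) h4 h

lemma le_pvBest (l : List String) (b c : Int) (hc : ∀ y ∈ l, c ≤ pvKey y) (hb : c ≤ b)
    (hb4 : b ≤ 4) : c ≤ l.foldl pvBestStep b := by
  induction l generalizing b with
  | nil => exact hb
  | cons x t ih =>
    rw [List.foldl_cons, pvBestStep_eq b x hb4]
    have := hc x List.mem_cons_self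
    exact ih (min b (pvKey x)) (fun y hy => hc y (List.mem_cons_of_mem x hy)) (by omega) (by omega)

-- A's scan over the defaults vs B's (first, best) result, for a nonempty ""-free list
lemma pvCore (l : List String) (hnil : l ≠ []) :
    (match DEFAULT_ACTIVE_SKILL_IDS.find? (fun d => l.contains d) with
      | some d => d
      | none => l.headD "")
    = (match l.head? with
      | none => ""
      | some first =>
        if l.foldl pvBestStep 4 < pvFallback
        then (PySem.List.pyGet? pvDefaultsB (l.foldl pvBestStep 4)).getD "" else first) := by
  obtain ⟨z, t, rfl⟩ := List.exists_cons_of_ne_nil hnil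
  set l := z :: t
  have hhead : l.head? = some z := rfl
  rw [hhead]
  have hFB : pvFallback = 4 := rfl
  by_cases h0 : "bull_trend" ∈ l
  · have hfind : DEFAULT_ACTIVE_SKILL_IDS.find? (fun d => l.contains d) = some "bull_trend" := by
      simp [DEFAULT_ACTIVE_SKILL_IDS, h0]
    have hbest : l.foldl pvBestStep 4 = 0 := by
      have h1 := pvBest_le_mem l 4 (le_refl 4) _ h0
      have h2 := le_pvBest l 4 0 (fun y _ => pvKey_nonneg y) (by omega) (le_refl 4)
      have : pvKey "bull_trend" = 0 := rfl
      omega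
    rw [hfind, hbest, hFB]; norm_num; rfl
  by_cases h1 : "ma_golden_cross" ∈ l
  · have hfind : DEFAULT_ACTIVE_SKILL_IDS.find? (fun d => l.contains d) = some "ma_golden_cross" := by
      simp [DEFAULT_ACTIVE_SKILL_IDS, List.find?, h0, h1]
    have hbest : l.foldl pvBestStep 4 = 1 := by
      have ha := pvBest_le_mem l 4 (le_refl 4) _ h1
      have hb := le_pvBest l 4 1 ?_ (by omega) (le_refl 4)
      · have : pvKey "ma_golden_cross" = 1 := rfl
        omega
      · intro y hy
        have hyb : y ≠ "bull_trend" := fun h => h0 (h ▸ hy)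
        simp only [pvKey, if_neg hyb]; split_ifs <;> omega
    rw [hfind, hbest, hFB]; norm_num; rfl
  by_cases h2 : "volume_breakout" ∈ l
  · have hfind : DEFAULT_ACTIVE_SKILL_IDS.find? (fun d => l.contains d) = some "volume_breakout" := by
      simp [DEFAULT_ACTIVE_SKILL_IDS, List.find?, h0, h1, h2]
    have hbest : l.foldl pvBestStep 4 = 2 := by
      have ha := pvBest_le_mem l 4 (le_refl 4) _ h2
      have hb := le_pvBest l 4 2 ?_ (by omega) (le_refl 4)
      · have : pvKey "volume_breakout" = 2 := rfl
        omega
      · intro y hy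
        have hyb : y ≠ "bull_trend" := fun h => h0 (h ▸ hy)
        have hym : y ≠ "ma_golden_cross" := fun h => h1 (h ▸ hy)
        simp only [pvKey, if_neg hyb, if_neg hym]; split_ifs <;> omega
    rw [hfind, hbest, hFB]; norm_num; rfl
  by_cases h3 : "shrink_pullback" ∈ l
  · have hfind : DEFAULT_ACTIVE_SKILL_IDS.find? (fun d => l.contains d) = some "shrink_pullback" := by
      simp [DEFAULT_ACTIVE_SKILL_IDS, List.find?, h0, h1, h2, h3]
    have hbest : l.foldl pvBestStep 4 = 3 := by
      have ha := pvBest_le_mem l 4 (le_refl 4) _ h3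
      have hb := le_pvBest l 4 3 ?_ (by omega) (le_refl 4)
      · have : pvKey "shrink_pullback" = 3 := rfl
        omega
      · intro y hy
        have hyb : y ≠ "bull_trend" := fun h => h0 (h ▸ hy)
        have hym : y ≠ "ma_golden_cross" := fun h => h1 (h ▸ hy)
        have hyv : y ≠ "volume_breakout" := fun h => h2 (h ▸ hy)
        simp only [pvKey, if_neg hyb, if_neg hym, if_neg hyv]; split_ifs <;> omega
    rw [hfind, hbest, hFB]; norm_num; rfl
  · have hfind : DEFAULT_ACTIVE_SKILL_IDS.find? (fun d => l.contains d) = none := by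
      simp [DEFAULT_ACTIVE_SKILL_IDS, List.find?, h0, h1, h2, h3]
    have hbest : l.foldl pvBestStep 4 = 4 := by
      have ha := (pvBest_le_init l 4 (le_refl 4)).2
      have hb := le_pvBest l 4 4 ?_ (le_refl 4) (le_refl 4)
      · omega
      · intro y hy
        have hyb : y ≠ "bull_trend" := fun h => h0 (h ▸ hy)
        have hym : y ≠ "ma_golden_cross" := fun h => h1 (h ▸ hy)
        have hyv : y ≠ "volume_breakout" := fun h => h2 (h ▸ hy)
        have hys : y ≠ "shrink_pullback" := fun h => h3 (h ▸ hy)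
        simp [pvKey, hyb, hym, hyv, hys]
    rw [hfind, hbest, hFB]
    norm_num
    rfl

-- the guarded fold in B equals (head? of filtered, running min over filtered)
lemma pvFold_char (xs : List String) :
    xs.foldl pvStepB (none, pvFallback)
      = ((xs.filter (fun s => s ≠ "")).head?,
         (xs.filter (fun s => s ≠ "")).foldl pvBestStep 4) := by
  rw [pvFold_filter]
  have hFB : pvFallback = 4 := rfl
  rw [hFB, pvFold_split _ (fun s hs => (List.mem_filter.mp hs).2 |> of_decide_eq_true) none 4,
      pvFirst_none]

-- ===== VERDICT (by name: the statement is the Claim_ definition above) =====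
theorem get_primary_default_skill_id_spec : Claim_equal_get_primary_default_skill_id := by
  intro a _
  unfold Spec_get_primary_default_skill_id
  cases a with
  | none => rfl
  | some xs =>
    simp only [get_primary_default_skill_id, get_primary_default_skill_id_alt, pvFold_char]
    by_cases he : (xs.filter (fun skill_id => skill_id ≠ "")).isEmpty
    · have : xs.filter (fun skill_id => skill_id ≠ "") = [] := by simpa [List.isEmpty_iff] using he
      rw [if_pos he, this]
      rfl
    · have hnil : xs.filter (fun skill_id => skill_id ≠ "") ≠ [] := by
        simpa [List.isEmpty_iff] using he
      rw [if_neg he]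
      exact pvCore (xs.filter (fun skill_id => skill_id ≠ "")) hnil
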